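-- pv_equiv track=rewrite | github.com/pypi-data/pypi-mirror-400 | packages/netbox-wug-sync/netbox_wug_sync-0.1.0.tar.gz/netbox_wug_sync-0.1.0/netbox_wug_sync/wug_client.py | build_group_path
-- ===== SOURCE A (Python) =====
-- from typing import Dict, List, Optional, Union
--
-- def build_group_path(group: Dict, groups_dict: Dict[str, Dict]) -> str:
--     """
--     Build the full path to a group by traversing parent relationships
--
--     Args:
--         group: The group dictionary
--         groups_dict: Dictionary mapping group IDs to group objects
--
--     Returns:
--         Full path like 'DATA_CENTERS\\CH_DC' or just group name if no parent
--     """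
--     path_parts = [group.get('name')]
--     current_group = group
--
--     # Traverse up to find all parents
--     while current_group.get('parentGroupId') and current_group.get('parentGroupId') not in ['0', '']:
--         parent_id = current_group.get('parentGroupId')
--         if parent_id in groups_dict:
--             parent_group = groups_dict[parent_id]
--             path_parts.insert(0, parent_group.get('name'))
--             current_group = parent_group
--         else:
--             break
--
--     # Join with backslash (Windows path separator for WUG)
--     return '\\'.join(path_parts)
-- ===== SOURCE B (Python) =====
-- from typing import Dict
--
--
-- def build_group_path(group: Dict, groups_dict: Dict[str, Dict]) -> str:
--     """Recursive re-implementation: the path of a group is the path of its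
--     resolvable parent followed by '\\' and the group's own name."""
--     pid = group.get('parentGroupId')
--     if pid and pid not in ('0', '') and pid in groups_dict:
--         return build_group_path(groups_dict[pid], groups_dict) + '\\' + group.get('name')
--     return group.get('name')
-- ===== Notes on version B (the rewrite author's own statement) =====
-- stated objective: simpler
-- what changed: Replaces the accumulate-and-prepend while loop (list of parts joined at the end) by a direct recursion over the parent chain that concatenates the parent's path, a backslash and the group's name.
import Mathlib
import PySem

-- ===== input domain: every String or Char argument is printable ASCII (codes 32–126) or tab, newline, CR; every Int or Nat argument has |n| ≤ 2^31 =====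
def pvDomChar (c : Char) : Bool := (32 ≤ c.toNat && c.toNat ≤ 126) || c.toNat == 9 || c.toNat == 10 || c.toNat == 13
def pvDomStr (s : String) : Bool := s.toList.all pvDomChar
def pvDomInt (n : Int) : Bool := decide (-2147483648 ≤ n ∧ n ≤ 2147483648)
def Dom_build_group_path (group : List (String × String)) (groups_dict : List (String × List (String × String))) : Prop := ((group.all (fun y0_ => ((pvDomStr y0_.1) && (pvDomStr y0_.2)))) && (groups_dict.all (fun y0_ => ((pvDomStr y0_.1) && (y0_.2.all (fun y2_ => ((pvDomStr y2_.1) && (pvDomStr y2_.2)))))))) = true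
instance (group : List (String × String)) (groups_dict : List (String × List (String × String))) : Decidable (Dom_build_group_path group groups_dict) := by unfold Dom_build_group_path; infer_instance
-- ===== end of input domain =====

-- B rewrites A's accumulate-and-prepend while loop as a direct recursion over the parent chain (simpler decomposition, same cost).

-- ===== PORT A =====
-- A's while loop: path_parts grows by insert(0, name); the loop is guarded by fuel
-- (groups_dict.length + 1 suffices on every input satisfying Pre_, whose chain-termination
-- condition rules out exactly the cyclic parent chains on which the Python A diverges).
-- A missing 'name' is rendered as "" here; under Pre_ every name is present
-- (Python A raises TypeError in join otherwise).
def pvLoopA (gd : PySem.Dict String (List (String × String))) :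
    Nat → List String → List (String × String) → List String
  | 0, parts, _ => parts
  | Nat.succ f, parts, cur =>
    match (PySem.Dict.mk cur).get? "parentGroupId" with
    | none => parts
    | some pid =>
      if pid = "" ∨ pid = "0" then parts
      else
        match gd.get? pid with
        | none => parts
        | some parent =>
          pvLoopA gd f (((PySem.Dict.mk parent).get? "name").getD "" :: parts) parent

def build_group_path (group : List (String × String)) (groups_dict : List (String × List (String × String))) : String :=
  PySem.Str.join "\\"
    (pvLoopA (PySem.Dict.mk groups_dict) (groups_dict.length + 1)
      [((PySem.Dict.mk group).get? "name").getD ""] group)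

-- ===== PORT B =====
-- B's recursion over the parent chain, with the same fuel bound as A's loop.
def pvRecB (gd : PySem.Dict String (List (String × String))) :
    Nat → List (String × String) → String
  | 0, group => ((PySem.Dict.mk group).get? "name").getD ""
  | Nat.succ f, group =>
    match (PySem.Dict.mk group).get? "parentGroupId" with
    | none => ((PySem.Dict.mk group).get? "name").getD ""
    | some pid =>
      if pid = "" ∨ pid = "0" then ((PySem.Dict.mk group).get? "name").getD ""
      else
        match gd.get? pid with
        | none => ((PySem.Dict.mk group).get? "name").getD ""
        | some parent =>
          pvRecB gd f parent ++ "\\" ++ ((PySem.Dict.mk group).get? "name").getD ""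

def build_group_path_alt (group : List (String × String)) (groups_dict : List (String × List (String × String))) : String :=
  pvRecB (PySem.Dict.mk groups_dict) (groups_dict.length + 1) group

-- ===== PRECONDITION & SPEC =====
-- pvStepIdx: one hop of the parent chain on dict indices (groups_dict.length = "stopped");
-- pvStartIdx: the index of the start group's parent entry, or "stopped" if none is followed.
def pvStepIdx (groups_dict : List (String × List (String × String))) (j : Nat) : Nat :=
  if h : j < groups_dict.length then
    match (PySem.Dict.mk (groups_dict[j]'h).2).get? "parentGroupId" with
    | none => groups_dict.length
    | some pid =>
      if pid = "" ∨ pid = "0" then groups_dict.length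
      else if ((PySem.Dict.mk groups_dict).get? pid).isSome
      then groups_dict.findIdx (fun kv => kv.1 == pid)
      else groups_dict.length
  else groups_dict.length

def pvStartIdx (group : List (String × String)) (groups_dict : List (String × List (String × String))) : Nat :=
  match (PySem.Dict.mk group).get? "parentGroupId" with
  | none => groups_dict.length
  | some pid =>
    if pid = "" ∨ pid = "0" then groups_dict.length
    else if ((PySem.Dict.mk groups_dict).get? pid).isSome
    then groups_dict.findIdx (fun kv => kv.1 == pid)
    else groups_dict.length

-- Pre_ excludes (1) inputs where a 'name' key is missing from the start group or from a
-- groups_dict entry on the visited parent chain (the orbit of pvStartIdx under pvStepIdx),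
-- on which Python A raises TypeError in '\\'.join, and (2) exactly the inputs
-- whose parent chain from the start group cycles, on which Python A diverges: the chain is
-- required to reach the stop sentinel within groups_dict.length index hops, which a terminating
-- chain (all visited entries distinct) always does.
def Pre_build_group_path (group : List (String × String)) (groups_dict : List (String × List (String × String))) : Prop :=
  ((PySem.Dict.mk group).get? "name").isSome = true ∧
  (∀ j, j < groups_dict.length → (∃ i, i < groups_dict.length ∧ (pvStepIdx groups_dict)^[i] (pvStartIdx group groups_dict) = j) →
    ∀ h : j < groups_dict.length, ((PySem.Dict.mk (groups_dict[j]'h).2).get? "name").isSome = true) ∧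
  (pvStepIdx groups_dict)^[groups_dict.length] (pvStartIdx group groups_dict) = groups_dict.length

instance (group : List (String × String)) (groups_dict : List (String × List (String × String))) : Decidable (Pre_build_group_path group groups_dict) := by unfold Pre_build_group_path; infer_instance

def pvWitness_build_group_path : (List (String × String)) × (List (String × List (String × String))) :=
  ([("name", "c"), ("parentGroupId", "2")],
   [("1", [("name", "a")]), ("2", [("name", "b"), ("parentGroupId", "1")])])

def Spec_build_group_path (group : List (String × String)) (groups_dict : List (String × List (String × String))) (out : String) : Prop := out = build_group_path_alt group groups_dict
instance (group : List (String × String)) (groups_dict : List (String × List (String × String))) (out : String) : Decidable (Spec_build_group_path group groups_dict out) := by unfold Spec_build_group_path; infer_instance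

-- ===== CLAIM (what is proved, stated in full; the proofs are below) =====
def Claim_equal_build_group_path : Prop := ∀ (group : List (String × String)) (groups_dict : List (String × List (String × String))), Dom_build_group_path group groups_dict → Pre_build_group_path group groups_dict → Spec_build_group_path group groups_dict (build_group_path group groups_dict)

-- ===== LEMMAS AND PROOFS =====

-- joining one more part at the end (general Chars fact not in the prelude's book)
theorem pv_join_append_singleton (sep a : List Char) :
    ∀ (xs : List (List Char)), xs ≠ [] →
      PySem.Chars.join sep (xs ++ [a]) = PySem.Chars.join sep xs ++ sep ++ a := by
  intro xs
  induction xs with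
  | nil => intro h; exact absurd rfl h
  | cons b rest ih =>
    intro _
    cases rest with
    | nil =>
      simp [PySem.Chars.join_cons_cons, PySem.Chars.join_singleton]
    | cons c rest' =>
      rw [List.cons_append, List.cons_append, PySem.Chars.join_cons_cons,
          PySem.Chars.join_cons_cons sep b c rest', ← List.cons_append]
      rw [ih (by simp)]
      simp [List.append_assoc]

-- the loop only prepends: its result is a chain prefix followed by the initial parts
theorem pvLoopA_prepend (gd : PySem.Dict String (List (String × String))) :
    ∀ (f : Nat) (cur : List (String × String)) (x : String) (parts : List String),
      pvLoopA gd f (x :: parts) cur = pvLoopA gd f [x] cur ++ parts := by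
  intro f
  induction f with
  | zero => intro cur x parts; simp [pvLoopA]
  | succ f ih =>
    intro cur x parts
    simp only [pvLoopA]
    cases h : (PySem.Dict.mk cur).get? "parentGroupId" with
    | none => rfl
    | some pid =>
      by_cases hp : pid = "" ∨ pid = "0"
      · simp [hp]
      · simp only [hp, if_false]
        cases hg : gd.get? pid with
        | none => rfl
        | some parent =>
          dsimp only
          rw [ih, ih parent _ [x]]
          simp [List.append_assoc]

-- the loop never shrinks its parts list
theorem pvLoopA_length_le (gd : PySem.Dict String (List (String × String))) :
    ∀ (f : Nat) (parts : List String) (cur : List (String × String)),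
      parts.length ≤ (pvLoopA gd f parts cur).length := by
  intro f
  induction f with
  | zero => intro parts cur; simp [pvLoopA]
  | succ f ih =>
    intro parts cur
    simp only [pvLoopA]
    cases (PySem.Dict.mk cur).get? "parentGroupId" with
    | none => exact le_refl _
    | some pid =>
      by_cases hp : pid = "" ∨ pid = "0"
      · simp [hp]
      · simp only [hp, if_false]
        cases gd.get? pid with
        | none => exact le_refl _
        | some parent =>
          calc parts.length ≤ (parts.length + 1) := Nat.le_succ _
          _ = (((PySem.Dict.mk parent).get? "name").getD "" :: parts).length := by simp
          _ ≤ _ := ih _ _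

-- A's joined loop result equals B's recursion, fuel for fuel
theorem pvLoopA_join_eq_pvRecB (gd : PySem.Dict String (List (String × String))) :
    ∀ (f : Nat) (cur : List (String × String)),
      PySem.Str.join "\\" (pvLoopA gd f [((PySem.Dict.mk cur).get? "name").getD ""] cur)
        = pvRecB gd f cur := by
  intro f
  induction f with
  | zero =>
    intro cur
    simp [pvLoopA, pvRecB, PySem.Str.join]
  | succ f ih =>
    intro cur
    simp only [pvLoopA, pvRecB]
    cases h : (PySem.Dict.mk cur).get? "parentGroupId" with
    | none => simp [PySem.Str.join]
    | some pid =>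
      by_cases hp : pid = "" ∨ pid = "0"
      · simp [hp, PySem.Str.join]
      · simp only [hp, if_false]
        cases hg : gd.get? pid with
        | none => simp [PySem.Str.join]
        | some parent =>
          dsimp only
          rw [pvLoopA_prepend gd f parent _ [((PySem.Dict.mk cur).get? "name").getD ""]]
          have hne : pvLoopA gd f [((PySem.Dict.mk parent).get? "name").getD ""] parent ≠ [] := by
            intro hnil
            have := pvLoopA_length_le gd f [((PySem.Dict.mk parent).get? "name").getD ""] parent
            simp [hnil] at this
          apply String.toList_injective
          rw [PySem.Str.toList_join, List.map_append, List.map_singleton,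
              pv_join_append_singleton _ _ _ (by simpa using hne),
              ← PySem.Str.toList_join]
          rw [ih parent]
          simp [String.toList_append]

-- ===== VERDICT (by name: the statement is the Claim_ definition above) =====
theorem build_group_path_spec : Claim_equal_build_group_path := by
  intro group groups_dict _ _
  unfold Spec_build_group_path build_group_path build_group_path_alt
  exact pvLoopA_join_eq_pvRecB _ _ _
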